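-- pv_equiv track=rewrite | github.com/Navy10021/CODE_is_ART | C-Programming/Partitions.py | get_partitioned_substr
-- ===== SOURCE A (Python) =====
-- def get_partitioned_substr(str):
--     partitions = []
--
--     def backtrack(start, curr_partition):
--         if start == len(str):
--             partitions.append(curr_partition[:])
--             return
--
--         for end in range(start + 1, len(str) + 1):
--             curr_partition.append(str[start : end])
--             backtrack(end, curr_partition)
--             curr_partition.pop()        # backtrack
--
--     backtrack(0, [])
--
--     return partitions
-- ===== SOURCE B (Python) =====
-- def get_partitioned_substr(str):
--     # Bitmask enumeration: each of the 2^(n-1) masks encodes the cut positions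
--     # between adjacent characters (leftmost gap = most significant bit);
--     # iterating masks in descending order reproduces the backtracking order.
--     n = len(str)
--     if n == 0:
--         return [[]]
--     res = []
--     for mask in range((1 << (n - 1)) - 1, -1, -1):
--         bits = [(mask >> k) & 1 for k in range(n - 2, -1, -1)]
--         parts = []
--         cur = str[0]
--         for ch, bit in zip(str[1:], bits):
--             if bit:
--                 parts.append(cur)
--                 cur = ch
--             else:
--                 cur += ch
--         parts.append(cur)
--         res.append(parts)
--     return res
-- ===== Notes on version B (the rewrite author's own statement) =====
-- stated objective: alternative
-- what changed: Replaces A's recursive backtracking with a shared mutable partition list by a flat iteration over the 2^(n-1) cut-position bitmasks in descending order, decoding each mask with one left-to-right walk over the string.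
import Mathlib
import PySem

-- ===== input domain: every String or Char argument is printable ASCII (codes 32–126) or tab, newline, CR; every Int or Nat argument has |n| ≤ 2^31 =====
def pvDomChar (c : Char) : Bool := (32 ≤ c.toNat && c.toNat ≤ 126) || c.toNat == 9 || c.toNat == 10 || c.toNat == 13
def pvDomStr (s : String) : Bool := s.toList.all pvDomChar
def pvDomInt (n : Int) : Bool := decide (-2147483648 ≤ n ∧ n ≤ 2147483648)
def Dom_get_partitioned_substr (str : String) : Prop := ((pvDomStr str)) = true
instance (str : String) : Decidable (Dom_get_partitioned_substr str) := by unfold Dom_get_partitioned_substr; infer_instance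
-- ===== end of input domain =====

-- B replaces A's recursive backtracking (which rebuilds shared suffix work) by a flat
-- enumeration of the 2^(n-1) cut-position bitmasks, one left-to-right walk per mask
-- (objective: alternative — a genuinely different, non-recursive algorithm, same output order).

-- ===== PORT A =====
-- A's recursion on `start`, made structural with fuel = s.length - start at each entry
-- (fuel only makes the recursion total; every reachable call has enough fuel).
-- `str[start:end]` with 0 ≤ start < end ≤ len is exactly take/drop;
-- `range(start+1, len(str)+1)` with start < len is exactly List.range' (start+1) (len - start).
-- A appends to an outer `partitions` list; functionally, each call returns the list of
-- partitions it appends, and the loop concatenates the recursive results in order.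
def pvBT (s : List Char) : Nat → Nat → List String → List (List String)
  | 0, start, curr => if start = s.length then [curr] else []
  | fuel + 1, start, curr =>
      if start = s.length then [curr]
      else
        (List.range' (start + 1) (s.length - start)).foldl
          (fun acc e =>
            acc ++ pvBT s fuel e (curr ++ [String.ofList ((s.drop start).take (e - start))])) []

def get_partitioned_substr (str : String) : List (List String) :=
  pvBT str.toList str.toList.length 0 []

-- ===== PORT B =====
-- bits = [(mask >> k) & 1 for k in range(n-2, -1, -1)]: Python's range(n-2,-1,-1)
-- enumerates n-2, …, 0, i.e. (List.range (n-1)).reverse; masks are nonnegative Python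
-- ints, represented as Nat (>> and & agree with Python on nonnegative ints).
def pvBits (k mask : Nat) : List Nat :=
  (List.range k).reverse.map (fun j => (mask >>> j) &&& 1)

-- one step of B's inner walk (cur kept as List Char; String.ofList at append time)
def pvStep (st : List String × List Char) (cb : Char × Nat) : List String × List Char :=
  if cb.2 ≠ 0 then (st.1 ++ [String.ofList st.2], [cb.1]) else (st.1, st.2 ++ [cb.1])

-- the walk over zip(str[1:], bits) starting from parts = [], cur = str[0]
def pvWalk (c : Char) (t : List Char) (bits : List Nat) : List String :=
  let st := (t.zip bits).foldl pvStep ([], [c])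
  st.1 ++ [String.ofList st.2]

-- range((1 << (n-1)) - 1, -1, -1) enumerates 2^(n-1)-1, …, 0 = (List.range (1 <<< (n-1))).reverse
def get_partitioned_substr_alt (str : String) : List (List String) :=
  match str.toList with
  | [] => [[]]
  | c :: t =>
      (List.range (1 <<< t.length)).reverse.foldl
        (fun res mask => res ++ [pvWalk c t (pvBits t.length mask)]) []

-- ===== PRECONDITION & SPEC =====
def Spec_get_partitioned_substr (str : String) (out : List (List String)) : Prop := out = get_partitioned_substr_alt str
instance (str : String) (out : List (List String)) : Decidable (Spec_get_partitioned_substr str out) := by unfold Spec_get_partitioned_substr; infer_instance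

-- ===== CLAIM (what is proved, stated in full; the proofs are below) =====
def Claim_equal_get_partitioned_substr : Prop := ∀ (str : String), Dom_get_partitioned_substr str → Spec_get_partitioned_substr str (get_partitioned_substr str)

-- ===== LEMMAS AND PROOFS =====

-- the common reference shape: partitions of c :: t, grouped as
-- "first cut right after c" ++ "c merged into the first piece of a partition of t"
def pvQC : Char → List Char → List (List (List Char))
  | c, [] => [[[c]]]
  | c, d :: t =>
      (pvQC d t).map (fun p => [c] :: p) ++
      (pvQC d t).map (fun p => match p with | [] => [] | h :: r => (c :: h) :: r)

def pvFC : List Char → List (List (List Char))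
  | [] => [[]]
  | c :: t => pvQC c t

-- B's walk, as a recursion (proof-side only)
def pvDC : List Char → List Char → List Nat → List (List Char)
  | cur, [], _ => [cur]
  | cur, _ :: _, [] => [cur]
  | cur, d :: t, b :: bits =>
      if b ≠ 0 then cur :: pvDC [d] t bits else pvDC (cur ++ [d]) t bits

theorem pvStep_acc (l : List (Char × Nat)) (parts : List String) (cur : List Char) :
    l.foldl pvStep (parts, cur) =
      (parts ++ (l.foldl pvStep ([], cur)).1, (l.foldl pvStep ([], cur)).2) := by
  induction l generalizing parts cur with
  | nil => simp
  | cons hd tl ih =>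
      simp only [List.foldl_cons, pvStep]
      split_ifs with h
      · rw [ih (parts ++ [String.ofList cur]) [hd.1], ih ([] ++ [String.ofList cur]) [hd.1]]
        simp
      · exact ih parts (cur ++ [hd.1])

theorem pvWalk_fold (t : List Char) (bits : List Nat) (cur : List Char) :
    (((t.zip bits).foldl pvStep ([], cur)).1 ++ [String.ofList ((t.zip bits).foldl pvStep ([], cur)).2])
      = (pvDC cur t bits).map String.ofList := by
  induction t generalizing bits cur with
  | nil => simp [pvDC]
  | cons d t ih =>
      cases bits with
      | nil => simp [pvDC]
      | cons b bs =>
          simp only [List.zip_cons_cons, List.foldl_cons, pvStep, pvDC]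
          split_ifs with h
          · rw [pvStep_acc _ ([] ++ [String.ofList cur]) [d]]
            simp [ih bs [d]]
          · exact ih bs (cur ++ [d])

theorem pvWalk_eq (c : Char) (t : List Char) (bits : List Nat) :
    pvWalk c t bits = (pvDC [c] t bits).map String.ofList := by
  simpa [pvWalk] using pvWalk_fold t bits [c]

theorem pvDC_cons (t : List Char) (bits : List Nat) (cur : List Char) (c : Char) :
    pvDC (c :: cur) t bits =
      match pvDC cur t bits with | [] => [] | h :: r => (c :: h) :: r := by
  induction t generalizing bits cur with
  | nil => simp [pvDC]
  | cons d t ih =>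
      cases bits with
      | nil => simp [pvDC]
      | cons b bs =>
          simp only [pvDC]
          split_ifs with h
          · rfl
          · simpa using ih bs (cur ++ [d])

theorem pvBits_head (k m : Nat) :
    pvBits (k + 1) m = ((m >>> k) &&& 1) :: pvBits k m := by
  simp [pvBits, List.range_succ]

theorem pvBits_tail_add (k m : Nat) :
    pvBits k (2 ^ k + m) = pvBits k m := by
  unfold pvBits
  refine List.map_congr_left ?_
  intro j hj
  rw [List.mem_reverse, List.mem_range] at hj
  have h2j : 0 < 2 ^ j := Nat.two_pow_pos j
  rw [Nat.shiftRight_eq_div_pow, Nat.shiftRight_eq_div_pow,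
      Nat.and_one_is_mod, Nat.and_one_is_mod]
  have hsplit : 2 ^ k = 2 ^ j * (2 * 2 ^ (k - 1 - j)) := by
    rw [← pow_succ', ← pow_add]
    congr 1
    omega
  rw [hsplit, Nat.add_comm (2 ^ j * (2 * 2 ^ (k - 1 - j))) m, Nat.add_mul_div_left _ _ h2j]
  omega

theorem pvBits_high (k m : Nat) (hm : m < 2 ^ k) :
    pvBits (k + 1) (2 ^ k + m) = 1 :: pvBits k m := by
  rw [pvBits_head, pvBits_tail_add]
  congr 1
  rw [Nat.shiftRight_eq_div_pow, Nat.and_one_is_mod]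
  have : (2 ^ k + m) / 2 ^ k = 1 := by
    rw [Nat.add_comm, Nat.add_div_right _ (Nat.two_pow_pos k),
        Nat.div_eq_of_lt hm]
  rw [this]

theorem pvBits_low (k m : Nat) (hm : m < 2 ^ k) :
    pvBits (k + 1) m = 0 :: pvBits k m := by
  rw [pvBits_head]
  congr 1
  rw [Nat.shiftRight_eq_div_pow, Nat.and_one_is_mod, Nat.div_eq_of_lt hm]

theorem pvB_eq_QC (t : List Char) (c : Char) :
    (List.range (2 ^ t.length)).reverse.map (fun m => pvDC [c] t (pvBits t.length m))
      = pvQC c t := by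
  induction t generalizing c with
  | nil => simp [pvDC, pvQC]
  | cons d t ih =>
      have hsplit : (2 : Nat) ^ (d :: t).length = 2 ^ t.length + 2 ^ t.length := by
        simp [pow_succ]; ring
      rw [hsplit, List.range_add, List.reverse_append, List.map_append]
      have h1 : ((List.range (2 ^ t.length)).map (fun x => 2 ^ t.length + x)).reverse.map
            (fun m => pvDC [c] (d :: t) (pvBits (d :: t).length m))
          = ((List.range (2 ^ t.length)).reverse.map (fun m => pvDC [d] t (pvBits t.length m))).map
            (fun p => [c] :: p) := by
        rw [← List.map_reverse, List.map_map, List.map_map]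
        refine List.map_congr_left ?_
        intro m hm
        rw [List.mem_reverse, List.mem_range] at hm
        simp only [Function.comp, List.length_cons, pvBits_high t.length m hm, pvDC]
        simp
      have h2 : (List.range (2 ^ t.length)).reverse.map
            (fun m => pvDC [c] (d :: t) (pvBits (d :: t).length m))
          = ((List.range (2 ^ t.length)).reverse.map (fun m => pvDC [d] t (pvBits t.length m))).map
            (fun p => match p with | [] => [] | h :: r => (c :: h) :: r) := by
        rw [List.map_map]
        refine List.map_congr_left ?_
        intro m hm
        rw [List.mem_reverse, List.mem_range] at hm
        simp only [Function.comp, List.length_cons, pvBits_low t.length m hm, pvDC]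
        rw [if_neg (by simp)]
        rw [show ([c] ++ [d] : List Char) = c :: [d] from rfl, pvDC_cons]
      rw [h1, h2, ih]
      rfl

theorem pvAlt_eq (str : String) :
    get_partitioned_substr_alt str = (pvFC str.toList).map (List.map String.ofList) := by
  cases h : str.toList with
  | nil => simp [get_partitioned_substr_alt, h, pvFC]
  | cons c t =>
      rw [show get_partitioned_substr_alt str
            = (List.range (1 <<< t.length)).reverse.foldl
                (fun res mask => res ++ [pvWalk c t (pvBits t.length mask)]) [] by
            unfold get_partitioned_substr_alt; rw [h]]
      rw [PySem.List.foldl_append_singleton_eq_map]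
      simp only [List.nil_append, Nat.one_shiftLeft]
      have : (List.range (2 ^ t.length)).reverse.map (fun mask => pvWalk c t (pvBits t.length mask))
          = (List.range (2 ^ t.length)).reverse.map
              (fun mask => (pvDC [c] t (pvBits t.length mask)).map String.ofList) := by
        refine List.map_congr_left ?_
        intro m _
        exact pvWalk_eq c t (pvBits t.length m)
      rw [this, show (List.range (2 ^ t.length)).reverse.map
            (fun mask => (pvDC [c] t (pvBits t.length mask)).map String.ofList)
          = ((List.range (2 ^ t.length)).reverse.map
              (fun mask => pvDC [c] t (pvBits t.length mask))).map (List.map String.ofList)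
          from (List.map_map ..).symm, pvB_eq_QC]
      rfl

-- A's grouping of partitions of c :: t by the length ℓ of the first piece
theorem pvQC_ell (c : Char) (t : List Char) :
    pvQC c t = (List.range (t.length + 1)).flatMap
      (fun j => (pvFC ((c :: t).drop (1 + j))).map (fun p => (c :: t).take (1 + j) :: p)) := by
  induction t generalizing c with
  | nil => simp [pvQC, pvFC]
  | cons d t ih =>
      rw [show (d :: t).length + 1 = 1 + (t.length + 1) by simp; omega, List.range_add,
          List.flatMap_append]
      have h1 : (List.range 1).flatMap
            (fun j => (pvFC ((c :: d :: t).drop (1 + j))).map (fun p => (c :: d :: t).take (1 + j) :: p))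
          = (pvQC d t).map (fun p => [c] :: p) := by
        simp [List.range_succ, pvFC]
      have h2 : ((List.range (t.length + 1)).map (fun x => 1 + x)).flatMap
            (fun j => (pvFC ((c :: d :: t).drop (1 + j))).map (fun p => (c :: d :: t).take (1 + j) :: p))
          = (pvQC d t).map (fun p => match p with | [] => [] | h :: r => (c :: h) :: r) := by
        rw [List.flatMap_map]
        have hcongr : ∀ j ∈ List.range (t.length + 1),
            (pvFC ((c :: d :: t).drop (1 + (1 + j)))).map (fun p => (c :: d :: t).take (1 + (1 + j)) :: p)
            = ((pvFC ((d :: t).drop (1 + j))).map (fun p => (d :: t).take (1 + j) :: p)).map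
                (fun p => match p with | [] => [] | h :: r => (c :: h) :: r) := by
          intro j _
          have hd : (c :: d :: t).drop (1 + (1 + j)) = (d :: t).drop (1 + j) := by
            rw [show 1 + (1 + j) = (1 + j) + 1 by omega, List.drop_succ_cons]
          rw [hd, List.map_map]
          refine List.map_congr_left ?_
          intro p _
          have ht : (c :: d :: t).take (1 + (1 + j)) = c :: (d :: t).take (1 + j) := by
            rw [show 1 + (1 + j) = (1 + j) + 1 by omega, List.take_succ_cons]
          rw [ht]
          rfl
        rw [List.flatMap_congr hcongr, ← List.flatMap_map, ← List.map_flatMap]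
        congr 1
        rw [ih d]
        simp [List.flatMap_map]
      rw [h1, h2]
      rfl

theorem pvBT_eq (s : List Char) (fuel start : Nat) (curr : List String)
    (hfuel : s.length ≤ start + fuel) (hstart : start ≤ s.length) :
    pvBT s fuel start curr
      = (pvFC (s.drop start)).map (fun p => curr ++ p.map String.ofList) := by
  induction fuel generalizing start curr with
  | zero =>
      have heq : start = s.length := by omega
      rw [pvBT, if_pos heq, List.drop_eq_nil_iff.mpr (le_of_eq heq.symm)]
      simp [pvFC]
  | succ fuel ih =>
      by_cases heq : start = s.length
      · rw [pvBT, if_pos heq, List.drop_eq_nil_iff.mpr (le_of_eq heq.symm)]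
        simp [pvFC]
      · have hlt : start < s.length := lt_of_le_of_ne hstart heq
        rw [pvBT, if_neg heq, PySem.List.foldl_append_eq_flatMap]
        rw [List.nil_append]
        have hcongr : ∀ e ∈ List.range' (start + 1) (s.length - start),
            pvBT s fuel e (curr ++ [String.ofList ((s.drop start).take (e - start))])
            = (pvFC (s.drop e)).map
                (fun p => (curr ++ [String.ofList ((s.drop start).take (e - start))]) ++ p.map String.ofList) := by
          intro e he
          rw [List.mem_range'] at he
          obtain ⟨i, hi, hei⟩ := he
          exact ih e _ (by omega) (by omega)
        rw [List.flatMap_congr hcongr]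
        -- pass to the suffix u = s.drop start (nonempty)
        obtain ⟨c, t, hct⟩ : ∃ c t, s.drop start = c :: t := by
          cases hu : s.drop start with
          | nil => exact absurd (List.drop_eq_nil_iff.mp hu) (by omega)
          | cons c t => exact ⟨c, t, rfl⟩
        have hlen : s.length - start = t.length + 1 := by
          have h1 : (s.drop start).length = t.length + 1 := by rw [hct]; simp
          simpa using h1
        rw [hct, hlen]
        simp only [pvFC]
        rw [pvQC_ell c t, List.map_flatMap]
        rw [List.range'_eq_map_range, List.flatMap_map]
        refine List.flatMap_congr ?_
        intro j hj
        rw [List.mem_range] at hj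
        have hdrop : s.drop (start + 1 + j) = (c :: t).drop (1 + j) := by
          rw [← hct, List.drop_drop]
          congr 1
          omega
        have htake : (c :: t).take (start + 1 + j - start) = (c :: t).take (1 + j) := by
          congr 1
          omega
        rw [hdrop, htake, List.map_map]
        refine List.map_congr_left ?_
        intro p _
        simp

-- ===== VERDICT (by name: the statement is the Claim_ definition above) =====
theorem get_partitioned_substr_spec : Claim_equal_get_partitioned_substr := by
  intro str _
  unfold Spec_get_partitioned_substr get_partitioned_substr
  rw [pvAlt_eq, pvBT_eq str.toList str.toList.length 0 [] (by omega) (by omega)]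
  simp
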